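-- pv_equiv track=rewrite | github.com/KirbysGit/taylor.io | backend/ai/post_processing/validation.py | has_unverified_infra_process_claim
-- ===== SOURCE A (Python) =====
-- from typing import Any, Dict, List
--
-- INFRA_PROCESS_TERMS = {
--     "ci/cd",
--     "cicd",
--     "devops",
--     "cloud-native",
--     "cloud native",
--     "deployment",
--     "deploy",
--     "production infrastructure",
--     "infrastructure",
--     "sre",
-- }
--
-- def has_unverified_infra_process_claim(
--     text: str,
--     resume_hits: List[str],
--     resume_evidence_lines: List[str],
-- ) -> bool:
--     lowered = str(text or "").lower()
--     if not lowered.strip():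
--         return False
--     evidence_blob = " ".join(str(x or "").lower() for x in resume_evidence_lines)
--     hits_blob = " ".join(str(x or "").lower() for x in resume_hits)
--     for term in INFRA_PROCESS_TERMS:
--         if term in lowered and term not in evidence_blob and term not in hits_blob:
--             return True
--     return False
-- ===== SOURCE B (Python) =====
-- from typing import List
--
-- INFRA_PROCESS_TERMS = [
--     "ci/cd",
--     "cicd",
--     "devops",
--     "cloud-native",
--     "cloud native",
--     "deployment",
--     "deploy",
--     "production infrastructure",
--     "infrastructure",
--     "sre",
-- ]
--
--
-- def _terms_found_in(s):
--     # Position-major scan: walk the string once by index and collect every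
--     # keyword that starts at that index (instead of one substring search per term).
--     return {t for i in range(len(s)) for t in INFRA_PROCESS_TERMS if s.startswith(t, i)}
--
--
-- def has_unverified_infra_process_claim(
--     text: str,
--     resume_hits: List[str],
--     resume_evidence_lines: List[str],
-- ) -> bool:
--     lowered = str(text or "").lower()
--     if not lowered.strip():
--         return False
--     evidence_blob = " ".join(str(x or "").lower() for x in resume_evidence_lines)
--     hits_blob = " ".join(str(x or "").lower() for x in resume_hits)
--     verified = _terms_found_in(evidence_blob) | _terms_found_in(hits_blob)
--     return not _terms_found_in(lowered) <= verified
-- ===== Notes on version B (the rewrite author's own statement) =====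
-- stated objective: alternative
-- what changed: Replaces A's term-major early-return loop of three substring-membership tests per keyword by a position-major scan: each string is walked once by index collecting the set of keywords that start at each position (startswith at offset), and the answer is a subset test of the text's term set against the union of the evidence and hits term sets.
import Mathlib
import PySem

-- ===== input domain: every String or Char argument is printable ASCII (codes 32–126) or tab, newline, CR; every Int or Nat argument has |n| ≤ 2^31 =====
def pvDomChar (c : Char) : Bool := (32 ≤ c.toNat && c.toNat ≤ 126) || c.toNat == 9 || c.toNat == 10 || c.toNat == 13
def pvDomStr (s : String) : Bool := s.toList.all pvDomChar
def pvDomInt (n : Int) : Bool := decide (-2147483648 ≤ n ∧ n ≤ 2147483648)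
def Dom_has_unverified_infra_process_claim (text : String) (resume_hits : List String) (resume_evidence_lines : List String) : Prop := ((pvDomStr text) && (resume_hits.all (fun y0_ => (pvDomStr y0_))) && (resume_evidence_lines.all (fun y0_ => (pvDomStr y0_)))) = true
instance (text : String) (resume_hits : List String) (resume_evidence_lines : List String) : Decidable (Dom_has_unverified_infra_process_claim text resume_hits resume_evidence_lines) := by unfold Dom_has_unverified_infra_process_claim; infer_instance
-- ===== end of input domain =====

-- B scans each string position by position, collecting the set of keywords that
-- start at each index, and decides by a subset test; same cost (objective: alternative).

-- INFRA_PROCESS_TERMS (a Python set literal of distinct strings; A consumes it via any, order-independent)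
def pvTerms : List String :=
  ["ci/cd", "cicd", "devops", "cloud-native", "cloud native", "deployment",
   "deploy", "production infrastructure", "infrastructure", "sre"]

-- ===== PORT A =====
def has_unverified_infra_process_claim (text : String) (resume_hits : List String) (resume_evidence_lines : List String) : Bool :=
  let lowered := PySem.Str.lower text
  if PySem.Str.strip lowered == "" then false
  else
    let evidence_blob := PySem.Str.join " " (resume_evidence_lines.map (fun x => PySem.Str.lower x))
    let hits_blob := PySem.Str.join " " (resume_hits.map (fun x => PySem.Str.lower x))
    -- for term in TERMS: if … return True; return False  (early-return loop = any)
    pvTerms.any (fun term =>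
      PySem.Str.isIn term lowered && !(PySem.Str.isIn term evidence_blob) && !(PySem.Str.isIn term hits_blob))

-- ===== PORT B =====
-- {t for i in range(len(s)) for t in INFRA_PROCESS_TERMS if s.startswith(t, i)}
def pvTermsFoundIn (s : List Char) : PySem.Set String :=
  PySem.Set.ofList ((List.range s.length).flatMap (fun i =>
    pvTerms.filter (fun t => PySem.Chars.startswith (s.drop i) t.toList)))

def has_unverified_infra_process_claim_alt (text : String) (resume_hits : List String) (resume_evidence_lines : List String) : Bool :=
  let lowered := PySem.Str.lower text
  if PySem.Str.strip lowered == "" then false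
  else
    let evidence_blob := PySem.Str.join " " (resume_evidence_lines.map (fun x => PySem.Str.lower x))
    let hits_blob := PySem.Str.join " " (resume_hits.map (fun x => PySem.Str.lower x))
    let verified := PySem.Set.union (pvTermsFoundIn evidence_blob.toList) (pvTermsFoundIn hits_blob.toList)
    !(PySem.Set.issubset (pvTermsFoundIn lowered.toList) verified)

-- ===== PRECONDITION & SPEC =====
def Spec_has_unverified_infra_process_claim (text : String) (resume_hits : List String) (resume_evidence_lines : List String) (out : Bool) : Prop := out = has_unverified_infra_process_claim_alt text resume_hits resume_evidence_lines
instance (text : String) (resume_hits : List String) (resume_evidence_lines : List String) (out : Bool) : Decidable (Spec_has_unverified_infra_process_claim text resume_hits resume_evidence_lines out) := by unfold Spec_has_unverified_infra_process_claim; infer_instance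

-- ===== CLAIM =====
def Claim_equal_has_unverified_infra_process_claim : Prop := ∀ (text : String) (resume_hits : List String) (resume_evidence_lines : List String), Dom_has_unverified_infra_process_claim text resume_hits resume_evidence_lines → Spec_has_unverified_infra_process_claim text resume_hits resume_evidence_lines (has_unverified_infra_process_claim text resume_hits resume_evidence_lines)

-- ===== LEMMAS AND PROOFS =====
theorem pv_terms_nonempty (t : String) (ht : t ∈ pvTerms) : t.toList ≠ [] := by
  fin_cases ht <;> decide

theorem pv_mem_found (s : List Char) (t : String) :
    t ∈ pvTermsFoundIn s ↔ t ∈ pvTerms ∧ PySem.Chars.isIn t.toList s = true := by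
  unfold pvTermsFoundIn
  simp only [PySem.Set.mem_ofList, List.mem_flatMap, List.mem_filter, List.mem_range]
  constructor
  · rintro ⟨i, hi, htm, hp⟩
    exact ⟨htm, (PySem.Chars.exists_prefix_drop_iff_isIn _ _).1
      ⟨i, (PySem.Chars.startswith_iff _ _).1 hp⟩⟩
  · rintro ⟨htm, hin⟩
    obtain ⟨j, hj⟩ := (PySem.Chars.exists_prefix_drop_iff_isIn _ _).2 hin
    have hne := pv_terms_nonempty t htm
    have hjlt : j < s.length := by
      by_contra h
      have : s.drop j = [] := List.drop_eq_nil_of_le (by omega)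
      rw [this] at hj
      exact hne (List.prefix_nil.mp hj)
    exact ⟨j, hjlt, htm, (PySem.Chars.startswith_iff _ _).2 hj⟩

theorem pv_any_eq_not_subset (lowered ev hits : List Char) :
    pvTerms.any (fun term =>
      PySem.Chars.isIn term.toList lowered && !(PySem.Chars.isIn term.toList ev) && !(PySem.Chars.isIn term.toList hits)) =
    !(PySem.Set.issubset (pvTermsFoundIn lowered)
        (PySem.Set.union (pvTermsFoundIn ev) (pvTermsFoundIn hits))) := by
  rw [Bool.eq_iff_iff, Bool.not_eq_true', Bool.eq_false_iff, Ne, PySem.Set.issubset_iff]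
  constructor
  · rw [List.any_eq_true]
    rintro ⟨t, htm, hconj⟩
    rw [Bool.and_eq_true, Bool.and_eq_true, Bool.not_eq_true', Bool.not_eq_true'] at hconj
    obtain ⟨⟨h1, h2⟩, h3⟩ := hconj
    intro hall
    have hmem := hall t ((pv_mem_found _ _).2 ⟨htm, h1⟩)
    rw [PySem.Set.mem_union] at hmem
    rcases hmem with h | h
    · rw [((pv_mem_found _ _).1 h).2] at h2; cases h2
    · rw [((pv_mem_found _ _).1 h).2] at h3; cases h3
  · intro hnall
    push_neg at hnall
    obtain ⟨t, hmem, hnot⟩ := hnall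
    obtain ⟨htm, h1⟩ := (pv_mem_found _ _).1 hmem
    rw [List.any_eq_true]
    refine ⟨t, htm, ?_⟩
    rw [Bool.and_eq_true, Bool.and_eq_true, Bool.not_eq_true', Bool.not_eq_true']
    refine ⟨⟨h1, ?_⟩, ?_⟩
    · by_contra h
      rw [Bool.not_eq_false] at h
      exact hnot (by rw [PySem.Set.mem_union]; exact Or.inl ((pv_mem_found _ _).2 ⟨htm, h⟩))
    · by_contra h
      rw [Bool.not_eq_false] at h
      exact hnot (by rw [PySem.Set.mem_union]; exact Or.inr ((pv_mem_found _ _).2 ⟨htm, h⟩))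

-- ===== VERDICT =====
theorem has_unverified_infra_process_claim_spec : Claim_equal_has_unverified_infra_process_claim := by
  intro text resume_hits resume_evidence_lines _
  unfold Spec_has_unverified_infra_process_claim
  unfold has_unverified_infra_process_claim has_unverified_infra_process_claim_alt
  by_cases h : (PySem.Str.strip (PySem.Str.lower text) == "") = true
  · simp only [h, if_true]
  · simp only [Bool.not_eq_true] at h
    simp only [h, Bool.false_eq_true, if_false]
    simp only [PySem.Str.isIn_eq]
    exact pv_any_eq_not_subset _ _ _
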